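-- pv_equiv track=rewrite | github.com/michelsb/FrameRTP4 | prototype/framertp4/utils/wildcards.py | permutation_pattern
-- ===== SOURCE A (Python) =====
-- import itertools
--
-- def permutation_pattern(pattern,maxWild):
--     provisorySolution = []
--     wildcards_position = [pos for pos,value in enumerate(pattern) if value == 2]
--     comb_size = len(wildcards_position) - maxWild
--     combs = itertools.combinations(wildcards_position,comb_size)
--     for comb in combs:
--         sample_pattern = [['0', '1'] if pos in comb else str(value) for pos,value in enumerate(pattern)]
--         subset_provisorySolution = [''.join(lst) for lst in itertools.product(*sample_pattern)]
--         provisorySolution.extend(subset_provisorySolution)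
--     return provisorySolution
-- ===== SOURCE B (Python) =====
-- def _combs(lst, k):
--     # all k-element combinations of lst, in itertools (lexicographic) order
--     if k < 0:
--         raise ValueError("k must be non-negative")
--     if k == 0:
--         return [()]
--     if not lst:
--         return []
--     head, tail = lst[0], lst[1:]
--     return [(head,) + c for c in _combs(tail, k - 1)] + _combs(tail, k)
--
--
-- def permutation_pattern(pattern, maxWild):
--     wildcards_position = [pos for pos, value in enumerate(pattern) if value == 2]
--     out = []
--     for comb in _combs(wildcards_position, len(wildcards_position) - maxWild):
--         rows = [[]]
--         for pos, value in enumerate(pattern):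
--             choices = ['0', '1'] if pos in comb else str(value)
--             rows = [row + [c] for row in rows for c in choices]
--         out.extend(''.join(row) for row in rows)
--     return out
-- ===== Notes on version B (the rewrite author's own statement) =====
-- stated objective: simpler
-- what changed: Replaces the itertools.combinations/itertools.product machinery with a small recursive combinations helper and a left-to-right row-extension fold that builds each output string position by position.
import Mathlib
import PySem

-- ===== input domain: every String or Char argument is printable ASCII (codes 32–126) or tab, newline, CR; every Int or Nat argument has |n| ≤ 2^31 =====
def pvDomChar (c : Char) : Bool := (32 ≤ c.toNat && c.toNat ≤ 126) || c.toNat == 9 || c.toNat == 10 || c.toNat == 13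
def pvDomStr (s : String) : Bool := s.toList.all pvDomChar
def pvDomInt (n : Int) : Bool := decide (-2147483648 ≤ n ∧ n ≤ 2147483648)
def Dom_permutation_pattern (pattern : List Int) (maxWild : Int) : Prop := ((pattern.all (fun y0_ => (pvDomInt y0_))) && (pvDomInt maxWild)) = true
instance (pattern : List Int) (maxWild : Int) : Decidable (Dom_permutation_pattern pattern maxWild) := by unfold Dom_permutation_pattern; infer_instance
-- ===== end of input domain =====

-- B replaces the itertools.combinations/itertools.product machinery with a small recursive
-- combinations helper and a left-to-right row-extension fold (objective: simpler).

-- ===== PORT A =====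
-- itertools.combinations of a list, in itertools' lexicographic order (Nat size; A's
-- comb_size can be negative, where Python raises ValueError — excluded by Pre_)
def itertoolsCombinations {α : Type} : List α → Nat → List (List α)
  | _, 0 => [[]]
  | [], _ + 1 => []
  | x :: xs, k + 1 =>
      ((itertoolsCombinations xs k).map (fun c => x :: c)) ++ itertoolsCombinations xs (k + 1)

-- itertools.product(*lists): leftmost factor varies slowest
def itertoolsProduct {α : Type} : List (List α) → List (List α)
  | [] => [[]]
  | c :: rest => c.flatMap (fun x => (itertoolsProduct rest).map (fun t => x :: t))

def permutation_pattern (pattern : List Int) (maxWild : Int) : List String :=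
  let wildcards_position :=
    (PySem.List.enumerate pattern).filterMap (fun pv => if pv.2 = 2 then some pv.1 else none)
  let comb_size : Int := (wildcards_position.length : Int) - maxWild
  -- .toNat is only reached under Pre_ (comb_size ≥ 0); Python raises ValueError otherwise
  let combs := itertoolsCombinations wildcards_position comb_size.toNat
  combs.foldl (fun acc comb =>
    let sample_pattern := (PySem.List.enumerate pattern).map
      (fun pv => if pv.1 ∈ comb then ['0', '1'] else PySem.Int.toChars pv.2)
    acc ++ (itertoolsProduct sample_pattern).map (fun lst => String.mk lst)) []

-- ===== PORT B =====
-- Source B's _combs: recursive; k < 0 raises ValueError in Python (excluded by Pre_, [] here)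
def combsB {α : Type} : List α → Int → List (List α)
  | l, k =>
    if k < 0 then []
    else if k = 0 then [[]]
    else
      match l with
      | [] => []
      | x :: xs => ((combsB xs (k - 1)).map (fun c => x :: c)) ++ combsB xs k
termination_by structural l => l

def permutation_pattern_alt (pattern : List Int) (maxWild : Int) : List String :=
  let wildcards_position :=
    (PySem.List.enumerate pattern).filterMap (fun pv => if pv.2 = 2 then some pv.1 else none)
  (combsB wildcards_position ((wildcards_position.length : Int) - maxWild)).foldl
    (fun out comb =>
      out ++ ((PySem.List.enumerate pattern).foldl (fun rows pv =>
          rows.flatMap (fun row =>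
            (if pv.1 ∈ comb then ['0', '1'] else PySem.Int.toChars pv.2).map
              (fun c => row ++ [c]))) [([] : List Char)]
        ).map (fun row => String.mk row)) []

-- ===== PRECONDITION & SPEC =====
-- Pre_ excludes exactly the inputs where A raises ValueError: maxWild larger than the
-- number of wildcard (value 2) positions, i.e. a negative size passed to itertools.combinations.
def Pre_permutation_pattern (pattern : List Int) (maxWild : Int) : Prop :=
  maxWild ≤ ((pattern.filter (fun v => v = 2)).length : Int)
instance (pattern : List Int) (maxWild : Int) : Decidable (Pre_permutation_pattern pattern maxWild) := by
  unfold Pre_permutation_pattern; infer_instance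

def pvWitness_permutation_pattern : List Int × Int := ([2, 0, 2], 1)

def Spec_permutation_pattern (pattern : List Int) (maxWild : Int) (out : List String) : Prop := out = permutation_pattern_alt pattern maxWild
instance (pattern : List Int) (maxWild : Int) (out : List String) : Decidable (Spec_permutation_pattern pattern maxWild out) := by unfold Spec_permutation_pattern; infer_instance

-- ===== CLAIM (what is proved, stated in full; the proofs are below) =====
def Claim_equal_permutation_pattern : Prop := ∀ (pattern : List Int) (maxWild : Int), Dom_permutation_pattern pattern maxWild → Pre_permutation_pattern pattern maxWild → Spec_permutation_pattern pattern maxWild (permutation_pattern pattern maxWild)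


-- ===== LEMMAS AND PROOFS =====

-- combsB on a nonnegative size is itertools.combinations
theorem combsB_eq_comb {α : Type} (l : List α) (k : Nat) :
    combsB l (k : Int) = itertoolsCombinations l k := by
  induction l generalizing k with
  | nil =>
    cases k with
    | zero => simp [combsB, itertoolsCombinations]
    | succ k =>
      have h1 : ¬ (((k + 1 : Nat) : Int) < 0) := by push_cast; omega
      have h2 : ¬ (((k + 1 : Nat) : Int) = 0) := by push_cast; omega
      rw [combsB]; simp only [h1, h2, if_false]; simp [itertoolsCombinations]
  | cons x xs ih =>
    cases k with
    | zero => simp [combsB, itertoolsCombinations]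
    | succ k =>
      have h1 : ¬ (((k + 1 : Nat) : Int) < 0) := by push_cast; omega
      have h2 : ¬ (((k + 1 : Nat) : Int) = 0) := by push_cast; omega
      have h3 : ((k + 1 : Nat) : Int) - 1 = (k : Int) := by push_cast; ring
      rw [combsB]
      simp only [h1, h2, if_false, h3, ih, itertoolsCombinations]

-- the row-extension foldl computes itertools.product (appended to every start row)
theorem foldl_extend_eq_product {α β : Type} (f : β → List α) (l : List β)
    (rows : List (List α)) :
    l.foldl (fun rs b => rs.flatMap (fun r => (f b).map (fun x => r ++ [x]))) rows
      = rows.flatMap (fun r => (itertoolsProduct (l.map f)).map (fun t => r ++ t)) := by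
  induction l generalizing rows with
  | nil => simp [itertoolsProduct]
  | cons b rest ih =>
    rw [List.foldl_cons, ih, List.map_cons, itertoolsProduct]
    simp only [List.flatMap_map, List.map_flatMap, List.flatMap_assoc, List.map_map]
    simp [Function.comp_def, List.append_assoc]

theorem wpos_length (pattern : List Int) (s : Int) :
    ((PySem.List.enumerate pattern s).filterMap
        (fun pv => if pv.2 = 2 then some pv.1 else none)).length
      = (pattern.filter (fun v => v = 2)).length := by
  induction pattern generalizing s with
  | nil => simp [PySem.List.enumerate_nil]
  | cons v vs ih =>
    rw [PySem.List.enumerate_cons, List.filterMap_cons, List.filter_cons]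
    by_cases h : v = 2 <;> simp [h, ih]

-- ===== VERDICT (by name: the statement is the Claim_ definition above) =====
theorem permutation_pattern_spec : Claim_equal_permutation_pattern := by
  intro pattern maxWild _ hpre
  unfold Spec_permutation_pattern permutation_pattern permutation_pattern_alt
  simp only []
  have hlen : ((PySem.List.enumerate pattern).filterMap
      (fun pv => if pv.2 = 2 then some pv.1 else none)).length
      = (pattern.filter (fun v => v = 2)).length := wpos_length pattern 0
  have hk : 0 ≤ (((PySem.List.enumerate pattern).filterMap
      (fun pv => if pv.2 = 2 then some pv.1 else none)).length : Int) - maxWild := by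
    unfold Pre_permutation_pattern at hpre
    omega
  have hcombs : ∀ (l : List Int) (k : Int), 0 ≤ k → combsB l k = itertoolsCombinations l k.toNat := by
    intro l k h
    conv_lhs => rw [← Int.toNat_of_nonneg h]
    exact combsB_eq_comb l k.toNat
  have key : ∀ comb : List Int,
      ((PySem.List.enumerate pattern).foldl (fun rows pv =>
          rows.flatMap (fun row =>
            (if pv.1 ∈ comb then ['0', '1'] else PySem.Int.toChars pv.2).map
              (fun c => row ++ [c]))) [([] : List Char)])
        = itertoolsProduct ((PySem.List.enumerate pattern).map
            (fun pv => if pv.1 ∈ comb then ['0', '1'] else PySem.Int.toChars pv.2)) := by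
    intro comb
    rw [foldl_extend_eq_product
          (fun pv : Int × Int => if pv.1 ∈ comb then ['0', '1'] else PySem.Int.toChars pv.2)]
    simp
  rw [hcombs _ _ hk]
  simp only [key]
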